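-- pv_equiv track=rewrite | github.com/kingsleykimm/Machine-Learning-2021 | Machine Learning/NEURAL RELU LAB/final.py | logistic_deriv
-- ===== SOURCE A (Python) =====
-- def polynomialMulti(A, B, a_size, b_size, logis): #Polynomial multiplication method
--     new_li = []
--     for j in range(a_size + b_size-1):
--         new_li.append(0)
--     for a in range(a_size):
--         for b in range(b_size):
--             prod = A[a] * B[b]
--             new_li[a+b] += prod
--     return new_li
--
-- def logistic_deriv(n): #returns the nth derivative of the transfer function
--     if n == 0:
--         return [0, 1]
--     elif n == 1:
--         return [0, 1, -1]
--     else: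
--         li = logistic_deriv(n-1)
--         new_li = []
--         for i in range(1, len(li)):
--             new_li.append(li[i] * i)
--         return polynomialMulti(new_li, [0, 1, -1], len(new_li), 3, True)
-- ===== SOURCE B (Python) =====
-- def logistic_deriv(n):  # iterative: start at s, n times take d/ds then multiply by (s - s^2) via shift-subtract
--     li = [0, 1]
--     for _ in range(n):
--         d = [li[i] * i for i in range(1, len(li))]
--         li = [(d[k - 1] if 1 <= k and k - 1 < len(d) else 0) - (d[k - 2] if 2 <= k else 0)
--               for k in range(len(d) + 2)]
--     return li
-- ===== Notes on version B (the rewrite author's own statement) =====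
-- stated objective: simpler
-- what changed: Replaces A's recursion plus the general polynomialMulti helper by a single flat loop that, each iteration, takes the coefficient-wise derivative and multiplies by (s - s^2) inline as a two-term shift-subtract.
import Mathlib
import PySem

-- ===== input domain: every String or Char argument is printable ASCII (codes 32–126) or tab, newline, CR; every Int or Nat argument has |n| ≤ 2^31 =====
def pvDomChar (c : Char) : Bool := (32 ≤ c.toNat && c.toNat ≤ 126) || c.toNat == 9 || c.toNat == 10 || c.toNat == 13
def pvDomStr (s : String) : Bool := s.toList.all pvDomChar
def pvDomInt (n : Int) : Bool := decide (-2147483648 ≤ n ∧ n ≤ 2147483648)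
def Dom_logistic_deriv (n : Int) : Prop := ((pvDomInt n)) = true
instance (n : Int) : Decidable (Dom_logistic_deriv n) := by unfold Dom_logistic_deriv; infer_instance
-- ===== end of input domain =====

-- B replaces A's recursion + general polynomial-multiplication helper by one flat loop with an
-- inline shift-subtract multiply-by-(s - s^2); objective: simpler (return value only, no mutation).

-- ===== PORT A =====
-- literal port of polynomialMulti (the unused 'logis' flag is dropped); indices here are
-- nonnegative and in range, so List.getD/List.set are exact for Python's A[a], B[b], new_li[a+b]
def polyMulti (A B : List Int) (a_size b_size : Nat) : List Int :=
  let new_li := (List.range (a_size + b_size - 1)).foldl (fun acc _ => acc ++ [(0 : Int)]) []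
  (List.range a_size).foldl (fun acc a =>
    (List.range b_size).foldl (fun acc2 b =>
      acc2.set (a + b) (acc2.getD (a + b) 0 + A.getD a 0 * B.getD b 0)) acc) new_li

-- A's recursion, on the depth n as a natural number (Pre_ restricts to n ≥ 0, where Python's
-- recursion on n-1 terminates); range(1, len(li)) is List.range' 1 (len-1), exact for these bounds
def logisticGo : Nat → List Int
  | 0 => [0, 1]
  | 1 => [0, 1, -1]
  | Nat.succ (Nat.succ k) =>
      let li := logisticGo (k + 1)
      let new_li := (List.range' 1 (li.length - 1)).foldl
        (fun acc i => acc ++ [li.getD i 0 * (i : Int)]) []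
      polyMulti new_li [0, 1, -1] new_li.length 3

def logistic_deriv (n : Int) : List Int := logisticGo n.toNat

-- ===== PORT B =====
-- d = [li[i] * i for i in range(1, len(li))]
def altDeriv (li : List Int) : List Int :=
  (List.range' 1 (li.length - 1)).map (fun i => li.getD i 0 * (i : Int))

-- [(d[k-1] if 1 <= k and k-1 < len(d) else 0) - (d[k-2] if 2 <= k else 0) for k in range(len(d)+2)]
def altStep (d : List Int) : List Int :=
  (List.range (d.length + 2)).map (fun k =>
    (if 1 ≤ k ∧ k - 1 < d.length then d.getD (k - 1) 0 else 0) -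
    (if 2 ≤ k then d.getD (k - 2) 0 else 0))

def logistic_deriv_alt (n : Int) : List Int :=
  (List.range n.toNat).foldl (fun li _ => altStep (altDeriv li)) [0, 1]

-- ===== PRECONDITION & SPEC =====
-- Pre_ excludes n < 0, where Python's A recurses on n-1 past every base case and raises
-- RecursionError. It also keeps n below a fixed bound because A's recursion is n levels deep,
-- so sufficiently large n makes A exceed the interpreter's recursion limit (the exact cut-off
-- depends on sys.getrecursionlimit(), so the bound is conservative); on such excluded n where
-- a deep-stack interpreter lets A return, B returns the same polynomial without recursing.
def Pre_logistic_deriv (n : Int) : Prop := 0 ≤ n ∧ n < 900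
instance (n : Int) : Decidable (Pre_logistic_deriv n) := by unfold Pre_logistic_deriv; infer_instance
def pvWitness_logistic_deriv : Int := (4)
def Spec_logistic_deriv (n : Int) (out : List Int) : Prop := out = logistic_deriv_alt n
instance (n : Int) (out : List Int) : Decidable (Spec_logistic_deriv n out) := by unfold Spec_logistic_deriv; infer_instance

-- ===== CLAIM (what is proved, stated in full; the proofs are below) =====
def Claim_equal_logistic_deriv : Prop := ∀ (n : Int), Dom_logistic_deriv n → Pre_logistic_deriv n → Spec_logistic_deriv n (logistic_deriv n)

-- ===== LEMMAS AND PROOFS =====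

-- the value of acc[k] after A's multiply loop has processed coefficients a < t of d
def pmF (d : List Int) (t k : Nat) : Int :=
  (if 1 ≤ k ∧ k - 1 < t then d.getD (k - 1) 0 else 0) -
  (if 2 ≤ k ∧ k - 2 < t then d.getD (k - 2) 0 else 0)

lemma getD_set (l : List Int) (i k : Nat) (v : Int) :
    (l.set i v).getD k 0 = if i = k ∧ i < l.length then v else l.getD k 0 := by
  simp only [List.getD_eq_getElem?_getD, List.getElem?_set]
  split_ifs with h h2 h3 h4 h5 <;> simp_all <;> try omega

lemma foldl_append_zero (m : Nat) (acc : List Int) :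
    (List.range m).foldl (fun a _ => a ++ [(0 : Int)]) acc = acc ++ List.replicate m 0 := by
  induction m generalizing acc with
  | zero => simp
  | succ t ih =>
      rw [List.range_succ, List.foldl_append, ih]
      simp [List.replicate_succ']

lemma foldl_append_map (l : List Nat) (f : Nat → Int) (acc : List Int) :
    l.foldl (fun a i => a ++ [f i]) acc = acc ++ l.map f := by
  induction l generalizing acc with
  | nil => simp
  | cons x xs ih => simp [List.foldl_cons, ih]

def pmLoop (d : List Int) (t : Nat) : List Int :=
  (List.range t).foldl (fun acc a =>
    (List.range 3).foldl (fun acc2 b =>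
      acc2.set (a + b) (acc2.getD (a + b) 0 + d.getD a 0 * ([0, 1, -1] : List Int).getD b 0)) acc)
    (List.replicate (d.length + 2) 0)

lemma pmLoop_succ (d : List Int) (t : Nat) :
    pmLoop d (t + 1) =
      (List.range 3).foldl (fun acc2 b =>
        acc2.set (t + b) (acc2.getD (t + b) 0 + d.getD t 0 * ([0, 1, -1] : List Int).getD b 0))
        (pmLoop d t) := by
  unfold pmLoop
  rw [List.range_succ (n := t), List.foldl_append, List.foldl_cons, List.foldl_nil]

set_option maxHeartbeats 1000000 in
lemma pm_inv (d : List Int) (t : Nat) (ht : t ≤ d.length) :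
    (pmLoop d t).length = d.length + 2 ∧ ∀ k, (pmLoop d t).getD k 0 = pmF d t k := by
  induction t with
  | zero =>
      refine ⟨by simp [pmLoop], fun k => ?_⟩
      simp [pmLoop, pmF, List.getD_eq_getElem?_getD, List.getElem?_replicate]
      split_ifs <;> simp
  | succ t ih =>
      have ht' : t ≤ d.length := Nat.le_of_succ_le ht
      have htl : t < d.length := ht
      obtain ⟨hlen, hval⟩ := ih ht'
      rw [pmLoop_succ]
      have h3 : List.range 3 = [0, 1, 2] := by decide
      rw [h3]
      simp only [List.foldl_cons, List.foldl_nil]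
      constructor
      · simp [hlen]
      · intro k
        simp only [getD_set, List.length_set, hlen, hval, pmF]
        have h0 : ([0, 1, -1] : List Int).getD 0 0 = 0 := by decide
        have h1 : ([0, 1, -1] : List Int).getD 1 0 = 1 := by decide
        have h2 : ([0, 1, -1] : List Int).getD 2 0 = -1 := by decide
        rw [h0, h1, h2]
        simp only [mul_zero, mul_one, mul_neg_one, add_zero]
        by_cases e1 : k = t
        · subst e1
          have ea : k + 1 - 1 = k := by omega
          have eb : k + 2 - 1 = k + 1 := by omega
          have ec : k + 2 - 2 = k := by omega
          simp only [ea, eb, ec, true_and]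
          split_ifs <;> omega
        · by_cases e2 : k = t + 1
          · subst e2
            have ea : t + 1 - 1 = t := by omega
            have eb : t + 1 - 2 = t - 1 := by omega
            simp only [ea, eb, true_and]
            split_ifs <;> omega
          · by_cases e3 : k = t + 2
            · subst e3
              have ea : t + 2 - 1 = t + 1 := by omega
              have eb : t + 2 - 2 = t := by omega
              simp only [ea, eb, true_and]
              split_ifs <;> omega
            · split_ifs <;> omega

lemma pm_eq (d : List Int) : polyMulti d [0, 1, -1] d.length 3 = altStep d := by
  obtain ⟨hlen, hval⟩ := pm_inv d d.length (le_refl _)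
  have hpl : polyMulti d [0, 1, -1] d.length 3 = pmLoop d d.length := by
    unfold polyMulti pmLoop
    rw [show d.length + 3 - 1 = d.length + 2 from by omega, foldl_append_zero]
    simp only [List.nil_append]
  rw [hpl]
  apply List.ext_getElem
  · simp [hlen, altStep]
  · intro k hk1 hk2
    have hk : k < d.length + 2 := by simpa [altStep] using hk2
    have hg : ∀ (l : List Int) (h : k < l.length), l[k] = l.getD k 0 := by
      intro l h; simp [List.getD_eq_getElem?_getD, List.getElem?_eq_getElem h]
    rw [hg _ hk1, hg _ hk2, hval]
    simp only [altStep, List.getD_eq_getElem?_getD, List.getElem?_map, List.getElem?_range hk]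
    simp only [pmF, Option.map_some, Option.getD_some, List.getD_eq_getElem?_getD]
    split_ifs <;> omega

-- A's derivative loop builds exactly altDeriv
lemma derivA_eq (li : List Int) :
    (List.range' 1 (li.length - 1)).foldl (fun acc i => acc ++ [li.getD i 0 * (i : Int)]) []
      = altDeriv li := by
  rw [foldl_append_map]; simp [altDeriv]

lemma go_succ (t : Nat) : logisticGo (t + 2) = altStep (altDeriv (logisticGo (t + 1))) := by
  conv_lhs => rw [logisticGo]
  simp only [derivA_eq, pm_eq]

lemma go_eq_fold : ∀ k : Nat,
    logisticGo (k + 1) = (List.range (k + 1)).foldl (fun li _ => altStep (altDeriv li)) [0, 1] := by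
  intro k
  induction k with
  | zero => decide
  | succ t ih =>
      rw [show t + 1 + 1 = t + 2 from rfl, go_succ,
        List.range_succ (n := t + 1), List.foldl_append, List.foldl_cons, List.foldl_nil, ih]

-- ===== VERDICT (by name: the statement is the Claim_ definition above) =====
theorem logistic_deriv_spec : Claim_equal_logistic_deriv := by
  intro n _ hpre
  unfold Spec_logistic_deriv logistic_deriv logistic_deriv_alt
  rcases Nat.eq_zero_or_pos n.toNat with h | h
  · rw [h]; decide
  · obtain ⟨k, hk⟩ := Nat.exists_eq_add_of_lt h
    rw [show n.toNat = k + 1 by omega, go_eq_fold]
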